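-- pv_equiv track=rewrite | github.com/chchaeun/study-algorithm | 기출/티맥스/fintech-2.py | solution
-- ===== SOURCE A (Python) =====
-- from collections import defaultdict
--
-- def in_range(y, x, n):
--     # 오른쪽 변 진행 시 아래, 왼쪽 변 진행 시 위로 넘어가는 경우
--     if y < n-1 and x == -(n-1) or 3 * (n-1) < y and x == n-1:
--         return False
--
--     return 0 <= y <= 4 * (n-1) and -(n-1) <= x <= n-1
--
-- def solution(n):
--     # 6방향으로 진행, 일자로 가는 경우는 2칸으로 처리
--     # 대각선은 1칸 처리
--     dys, dxs = [1, 2, 1, -1, -2, -1], [1, 0, -1, -1, 0, 1]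
--
--     bee = defaultdict(int)
--
--     num = 1
--     direction = 0
--     y, x = 0, 0
--
--     while True:
--         bee[(y, x)] = num
--
--         ny, nx = y + dys[direction], x + dxs[direction]
--
--         # 벗어나거나 이미 방문했으면 방향 전환
--         # 6번 전부 방문할 수 없으면 완전히 종료
--         for _ in range(6):
--             if not in_range(ny, nx, n) or bee[(ny, nx)]:
--                 direction = (direction + 1) % 6
--                 ny, nx = y + dys[direction], x + dxs[direction]
--
--             if in_range(ny, nx, n) and not bee[(ny, nx)]:
--                 break
--         else:
--             break
--
--         y, x = ny, nx
--         num += 1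
--
--     answer = []
--     for key in sorted(bee.keys()):
--         if bee[key]:
--             answer.append(bee[key])
--
--     return answer
-- ===== SOURCE B (Python) =====
-- def solution(n):
--     # Build the hexagon ring by ring (outermost first) instead of simulating
--     # the turning spiral: ring k starts at its top cell and walks the six
--     # directions k steps each; the single center cell is the final ring.
--     dys = [1, 2, 1, -1, -2, -1]
--     dxs = [1, 0, -1, -1, 0, 1]
--     bee = {}
--     num = 1
--     for k in range(n - 1, 0, -1):
--         y, x = 2 * (n - 1) - 2 * k, 0
--         for d in range(6):
--             for _ in range(k):
--                 bee[(y, x)] = num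
--                 num += 1
--                 y, x = y + dys[d], x + dxs[d]
--     bee[(2 * (n - 1), 0)] = num
--     return [bee[key] for key in sorted(bee)]
-- ===== Notes on version B (the rewrite author's own statement) =====
-- stated objective: faster
-- what changed: B replaces A's turn-probing spiral simulation (up to six direction probes with range checks and visited-dict reads at every cell) by direct ring-by-ring construction: each hexagon ring is walked from its top cell as six straight segments of k steps, the center cell is written last, with no probing at all.
import Mathlib
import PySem

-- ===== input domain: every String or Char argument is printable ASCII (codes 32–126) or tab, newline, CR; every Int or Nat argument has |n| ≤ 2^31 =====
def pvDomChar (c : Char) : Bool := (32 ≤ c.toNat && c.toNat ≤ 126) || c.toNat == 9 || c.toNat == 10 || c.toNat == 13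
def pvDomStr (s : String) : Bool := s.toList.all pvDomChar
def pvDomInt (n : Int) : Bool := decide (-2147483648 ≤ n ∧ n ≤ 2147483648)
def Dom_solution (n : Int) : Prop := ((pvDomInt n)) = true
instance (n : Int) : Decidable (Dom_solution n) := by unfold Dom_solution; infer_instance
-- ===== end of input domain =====

-- B builds the hexagon ring by ring (six straight segments per ring, center last)
-- instead of A's probe-and-turn spiral simulation; same return value, same cost class.

-- ===== PORT A =====
-- shared constants: the six direction deltas (doubled y-coordinates)
def pvDys : List Int := [1, 2, 1, -1, -2, -1]
def pvDxs : List Int := [1, 0, -1, -1, 0, 1]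

-- dys[direction] / dxs[direction]; exact for 0 ≤ d < 6, the only indices either program uses
def pvDy (d : Int) : Int := PySem.List.pyGetD pvDys d 0
def pvDx (d : Int) : Int := PySem.List.pyGetD pvDxs d 0

def pvInRange (y x n : Int) : Bool :=
  if (decide (y < n-1) && (x == -(n-1))) || (decide (3*(n-1) < y) && (x == n-1)) then false
  else decide (0 ≤ y) && decide (y ≤ 4*(n-1)) && decide (-(n-1) ≤ x) && decide (x ≤ n-1)

-- defaultdict(int) read: bee[k] returns the stored value, or stores and returns 0 when k is absent
def pvDget (bee : PySem.Dict (Int × Int) Int) (k : Int × Int) :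
    Int × PySem.Dict (Int × Int) Int :=
  match bee.get? k with
  | some v => (v, bee)
  | none => (0, bee.insert k 0)

-- the inner `for _ in range(6): … else: break`-less search; returns (broke?, direction, ny, nx, bee)
def pvProbe (n : Int) : Nat → Int → Int → Int → Int → Int → PySem.Dict (Int × Int) Int →
    Bool × Int × Int × Int × PySem.Dict (Int × Int) Int
  | 0, dir, _, _, ny, nx, bee => (false, dir, ny, nx, bee)
  | t+1, dir, y, x, ny, nx, bee =>
    -- if not in_range(ny, nx, n) or bee[(ny, nx)]:   (short-circuit: bee read only when in range)
    let c : Bool × PySem.Dict (Int × Int) Int :=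
      if pvInRange ny nx n then
        let r := pvDget bee (ny, nx); (r.1 != 0, r.2)
      else (true, bee)
    let dir' := if c.1 then PySem.Int.mod (dir + 1) 6 else dir
    let ny' := if c.1 then y + pvDy dir' else ny
    let nx' := if c.1 then x + pvDx dir' else nx
    -- if in_range(ny, nx, n) and not bee[(ny, nx)]: break
    if pvInRange ny' nx' n then
      let r := pvDget c.2 (ny', nx')
      if r.1 == 0 then (true, dir', ny', nx', r.2)
      else pvProbe n t dir' y x ny' nx' r.2
    else pvProbe n t dir' y x ny' nx' c.2

-- the outer `while True`; fuel ≥ number of cells (3n(n-1)+1), proved sufficient below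
def pvLoop (n : Int) : Nat → PySem.Dict (Int × Int) Int → Int → Int → Int → Int →
    PySem.Dict (Int × Int) Int
  | 0, bee, _, _, _, _ => bee
  | f+1, bee, num, dir, y, x =>
    let bee1 := bee.insert (y, x) num
    let r := pvProbe n 6 dir y x (y + pvDy dir) (x + pvDx dir) bee1
    match r with
    | (true, dir', ny, nx, bee2) => pvLoop n f bee2 (num + 1) dir' ny nx
    | (false, _, _, _, bee2) => bee2

def solution (n : Int) : List Int :=
  let bee := pvLoop n (3 * n * n + 2).toNat PySem.Dict.empty 1 0 0 0
  let ks := PySem.List.sorted2 bee.keys (fun k => k.1) (fun k => k.2) false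
  (ks.foldl (fun (acc : List Int × PySem.Dict (Int × Int) Int) key =>
      let r := pvDget acc.2 key
      (if r.1 != 0 then acc.1 ++ [r.1] else acc.1, r.2)) ([], bee)).1

-- ===== PORT B =====
def solution_alt (n : Int) : List Int :=
  let st :=
    (PySem.List.pyRange (n - 1) 0 (-1)).foldl
      (fun (st : PySem.Dict (Int × Int) Int × Int) k =>
        let s3 :=
          (PySem.List.pyRange 0 6 1).foldl
            (fun (s : PySem.Dict (Int × Int) Int × Int × Int × Int) d =>
              (PySem.List.pyRange 0 k 1).foldl
                (fun (s : PySem.Dict (Int × Int) Int × Int × Int × Int) _ =>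
                  (s.1.insert (s.2.2.1, s.2.2.2) s.2.1, s.2.1 + 1,
                   s.2.2.1 + pvDy d, s.2.2.2 + pvDx d)) s)
            (st.1, st.2, 2 * (n - 1) - 2 * k, 0)
        (s3.1, s3.2.1))
      (PySem.Dict.empty, 1)
  let bee := st.1.insert (2 * (n - 1), 0) st.2
  (PySem.List.sorted2 bee.keys (fun k => k.1) (fun k => k.2) false).map (fun key => bee.getD key 0)

-- ===== PRECONDITION & SPEC =====
def Spec_solution (n : Int) (out : List Int) : Prop := out = solution_alt n
instance (n : Int) (out : List Int) : Decidable (Spec_solution n out) := by unfold Spec_solution; infer_instance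

-- ===== CLAIM (what is proved, stated in full; the proofs are below) =====
def Claim_equal_solution : Prop := ∀ (n : Int), Dom_solution n → Spec_solution n (solution n)

-- ===== LEMMAS AND PROOFS =====

-- ---- proof-layer vocabulary: the hexagon's rings, segments and numbering ----

-- start cell of segment d of ring k (d ∈ [0,5])
def pvSS (n k d : Int) : Int × Int :=
  if d = 0 then (2*n-2-2*k, 0)
  else if d = 1 then (2*n-2-k, k)
  else if d = 2 then (2*n-2+k, k)
  else if d = 3 then (2*n-2+2*k, 0)
  else if d = 4 then (2*n-2+k, -k)
  else (2*n-2-k, -k)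

-- cell j of segment d of ring k
def pvPos (n k d j : Int) : Int × Int :=
  ((pvSS n k d).1 + j * pvDy d, (pvSS n k d).2 + j * pvDx d)

-- the spiral number written at that cell
def pvNum (n k d j : Int) : Int := 1 + 3*((n-1)*n - k*(k+1)) + d*k + j

def pvPair (n k d j : Int) : (Int × Int) × Int := (pvPos n k d j, pvNum n k d j)

def segP (n k d : Int) : List ((Int × Int) × Int) :=
  (PySem.List.pyRange 0 k 1).map (fun j => pvPair n k d j)

def ringP (n k : Int) : List ((Int × Int) × Int) :=
  (PySem.List.pyRange 0 6 1).flatMap (fun d => segP n k d)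

-- rings n-1 down to k+1
def ringsP (n k : Int) : List ((Int × Int) × Int) :=
  (PySem.List.pyRange (n-1) k (-1)).flatMap (fun k' => ringP n k')

def ctrP (n : Int) : (Int × Int) × Int := ((2*(n-1), 0), 3*n*(n-1)+1)

-- the full dict contents, in insertion order
def pairsP (n : Int) : List ((Int × Int) × Int) := ringsP n 0 ++ [ctrP n]

-- what has been written strictly before cell (k,d,j)
def prefP (n k d j : Int) : List ((Int × Int) × Int) :=
  ringsP n k ++ (PySem.List.pyRange 0 d 1).flatMap (fun d' => segP n k d')
    ++ (PySem.List.pyRange 0 j 1).map (fun j' => pvPair n k d j')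

-- what is still to be written from cell (k,d,j) on
def sfxP (n k d j : Int) : List ((Int × Int) × Int) :=
  (PySem.List.pyRange j k 1).map (fun j' => pvPair n k d j')
    ++ (PySem.List.pyRange (d+1) 6 1).flatMap (fun d' => segP n k d')
    ++ (PySem.List.pyRange (k-1) 0 (-1)).flatMap (fun k' => ringP n k')
    ++ [ctrP n]

-- the direction A's loop holds when it sits at cell (k,d,j)
def pvArr (d j : Int) : Int := if j = 0 then (if d = 0 then 0 else d - 1) else d

def PvValid (n k d j : Int) : Prop :=
  1 ≤ k ∧ k ≤ n-1 ∧ 0 ≤ d ∧ d ≤ 5 ∧ 0 ≤ j ∧ j ≤ k-1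

-- membership of a cell in ring k, stated linearly (u = y - center, v = x)
def RingProp (n k : Int) (p : Int × Int) : Prop :=
  -k ≤ p.2 ∧ p.2 ≤ k ∧
  (p.1-(2*n-2)) + p.2 ≤ 2*k ∧ (p.1-(2*n-2)) - p.2 ≤ 2*k ∧
  -(2*k) ≤ (p.1-(2*n-2)) + p.2 ∧ -(2*k) ≤ (p.1-(2*n-2)) - p.2 ∧
  (p.2 = k ∨ p.2 = -k ∨ (p.1-(2*n-2)) + p.2 = 2*k ∨ (p.1-(2*n-2)) - p.2 = 2*k ∨
   (p.1-(2*n-2)) + p.2 = -(2*k) ∨ (p.1-(2*n-2)) - p.2 = -(2*k))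

-- ---- tiny evaluation lemmas ----
theorem ringProp_ctr (n : Int) : RingProp n 0 (2*(n-1), 0) := by
  simp [RingProp]; omega

theorem ringProp_disj (n k k' : Int) (p : Int × Int) (hne : k ≠ k')
    (h : RingProp n k p) (h' : RingProp n k' p) : False := by
  rcases h with ⟨a1,a2,a3,a4,a5,a6,a7⟩
  rcases h' with ⟨b1,b2,b3,b4,b5,b6,b7⟩
  rcases lt_or_gt_of_ne hne with h | h <;> omega

theorem ringProp_pos (n k d j : Int) (h1 : 1 ≤ k) (h3 : 0 ≤ d) (h4 : d ≤ 5)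
    (h5 : 0 ≤ j) (h6 : j ≤ k-1) : RingProp n k (pvPos n k d j) := by
  unfold RingProp pvPos pvSS
  interval_cases d <;>
    simp [pvDy, pvDx, pvDys, pvDxs, PySem.List.pyGetD] <;> omega

theorem pos_inj_ring (n k d j d' j' : Int) (h1 : 1 ≤ k) (h3 : 0 ≤ d) (h4 : d ≤ 5)
    (h5 : 0 ≤ j) (h6 : j ≤ k-1) (g3 : 0 ≤ d') (g4 : d' ≤ 5) (g5 : 0 ≤ j') (g6 : j' ≤ k-1)
    (he : pvPos n k d j = pvPos n k d' j') : d = d' ∧ j = j' := by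
  unfold pvPos pvSS at he
  rw [Prod.ext_iff] at he
  interval_cases d <;> interval_cases d' <;>
    simp [pvDy, pvDx, pvDys, pvDxs, PySem.List.pyGetD] at he ⊢ <;> omega

theorem inRange_pos (n k d j : Int) (hn : 2 ≤ n) (h : PvValid n k d j) :
    pvInRange (pvPos n k d j).1 (pvPos n k d j).2 n = true := by
  obtain ⟨h1,h2,h3,h4,h5,h6⟩ := h
  unfold pvInRange pvPos pvSS
  interval_cases d <;>
    simp [pvDy, pvDx, pvDys, pvDxs, PySem.List.pyGetD] <;> omega

theorem inRange_overshoot (n d : Int) (hn : 2 ≤ n) (hd1 : 1 ≤ d) (hd5 : d ≤ 5) :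
    pvInRange ((pvPos n (n-1) d 0).1 + pvDy (d-1)) ((pvPos n (n-1) d 0).2 + pvDx (d-1)) n
      = false := by
  unfold pvInRange pvPos pvSS
  interval_cases d <;>
    simp [pvDy, pvDx, pvDys, pvDxs, PySem.List.pyGetD] <;> omega

theorem inRange_small (n d : Int) (hn : n ≤ 1) (h0 : 0 ≤ d) (h5 : d ≤ 5) :
    pvInRange (0 + pvDy d) (0 + pvDx d) n = false := by
  unfold pvInRange
  interval_cases d <;>
    simp [pvDy, pvDx, pvDys, pvDxs, PySem.List.pyGetD] <;> omega
theorem pyRange_neg_one_append (a m b : Int) (h1 : b ≤ m) (h2 : m ≤ a) :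
    PySem.List.pyRange a b (-1) = PySem.List.pyRange a m (-1) ++ PySem.List.pyRange m b (-1) := by
  rw [PySem.List.pyRange_neg_one_eq_reverse, PySem.List.pyRange_neg_one_eq_reverse,
    PySem.List.pyRange_neg_one_eq_reverse,
    PySem.List.pyRange_one_append (b+1) (m+1) (a+1) (by omega) (by omega), List.reverse_append]

theorem ringsP_step (n k : Int) (h1 : 1 ≤ k) (hk : k ≤ n - 1) :
    ringsP n (k-1) = ringsP n k ++ ringP n k := by
  unfold ringsP
  rw [pyRange_neg_one_append (n-1) k (k-1) (by omega) hk, List.flatMap_append]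
  congr 1
  rw [PySem.List.pyRange_neg_one_cons (by omega), PySem.List.pyRange_neg_one_eq_nil (by omega)]
  simp

theorem split_pairs (n k d j : Int) (h1 : 1 ≤ k) (h2 : k ≤ n-1) (h3 : 0 ≤ d) (h4 : d ≤ 5)
    (h5 : 0 ≤ j) (h6 : j ≤ k) :
    pairsP n = prefP n k d j ++ sfxP n k d j := by
  unfold pairsP prefP sfxP ringsP
  rw [pyRange_neg_one_append (n-1) k 0 (by omega) (by omega),
    PySem.List.pyRange_neg_one_cons (show (0:Int) < k by omega), List.flatMap_append,
    List.flatMap_cons]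
  have hring : ringP n k =
      (PySem.List.pyRange 0 d 1).flatMap (fun d' => segP n k d')
        ++ ((PySem.List.pyRange 0 j 1).map (fun j' => pvPair n k d j')
            ++ (PySem.List.pyRange j k 1).map (fun j' => pvPair n k d j'))
        ++ (PySem.List.pyRange (d+1) 6 1).flatMap (fun d' => segP n k d') := by
    unfold ringP
    rw [PySem.List.pyRange_one_append 0 d 6 h3 (by omega), List.flatMap_append,
      PySem.List.pyRange_one_cons (show d < 6 by omega), List.flatMap_cons]
    have hseg : segP n k d =
        (PySem.List.pyRange 0 j 1).map (fun j' => pvPair n k d j')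
          ++ (PySem.List.pyRange j k 1).map (fun j' => pvPair n k d j') := by
      unfold segP
      rw [PySem.List.pyRange_one_append 0 j k h5 h6, List.map_append]
    rw [hseg]; simp [List.append_assoc]
  rw [hring]; simp [List.append_assoc]

theorem sfx_cons (n k d j : Int) (hjk : j < k) :
    sfxP n k d j = pvPair n k d j :: sfxP n k d (j+1) := by
  unfold sfxP
  rw [PySem.List.pyRange_one_cons hjk]
  simp

theorem sfx_seg_end (n k d : Int) (hd5 : d ≤ 4) :
    sfxP n k d k = sfxP n k (d+1) 0 := by
  unfold sfxP
  rw [PySem.List.pyRange_one_eq_nil (le_refl k),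
    PySem.List.pyRange_one_cons (show d+1 < 6 by omega)]
  by_cases hk : 0 ≤ k
  · simp [segP, List.append_assoc]
  · rw [PySem.List.pyRange_one_eq_nil (show k ≤ 0 by omega)]
    simp [segP, PySem.List.pyRange_one_eq_nil (show k ≤ 0 by omega), List.append_assoc]

theorem sfx_ring_end (n k : Int) (hk : 2 ≤ k) :
    sfxP n k 5 k = sfxP n (k-1) 0 0 := by
  unfold sfxP
  rw [PySem.List.pyRange_one_eq_nil (le_refl k),
    show PySem.List.pyRange (5+1) 6 1 = [] from rfl,
    show PySem.List.pyRange (0+1) 6 1 = PySem.List.pyRange 1 6 1 from rfl,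
    PySem.List.pyRange_neg_one_cons (show (0:Int) < k - 1 by omega)]
  have hr : ringP n (k-1) = segP n (k-1) 0
      ++ (PySem.List.pyRange 1 6 1).flatMap (fun d' => segP n (k-1) d') := by
    unfold ringP
    rw [show PySem.List.pyRange 0 6 1 = 0 :: PySem.List.pyRange 1 6 1 from rfl]
    simp
  simp only [List.flatMap_cons, List.flatMap_nil, List.map_nil, List.nil_append, hr]
  simp [segP, List.append_assoc]

theorem sfx_last (n : Int) : sfxP n 1 5 1 = [ctrP n] := by
  unfold sfxP
  rfl
theorem mem_pairs_shape (n : Int) {p : (Int × Int) × Int} (h : p ∈ pairsP n) :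
    (∃ k d j, PvValid n k d j ∧ p = pvPair n k d j) ∨ p = ctrP n := by
  unfold pairsP ringsP ringP segP at h
  rcases List.mem_append.1 h with h | h
  · simp only [List.mem_flatMap, List.mem_map] at h
    obtain ⟨k, hk, d, hd, j, hj, rfl⟩ := h
    rw [PySem.List.mem_pyRange_neg_one] at hk
    rw [PySem.List.mem_pyRange_one] at hd hj
    exact Or.inl ⟨k, d, j, ⟨by omega, by omega, by omega, by omega, by omega, by omega⟩, rfl⟩
  · simp only [List.mem_singleton] at h
    exact Or.inr h

theorem mem_ring_keys (n k : Int) {q : Int × Int}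
    (h : q ∈ (ringP n k).map (fun r => r.1)) :
    ∃ d j, 0 ≤ d ∧ d ≤ 5 ∧ 0 ≤ j ∧ j ≤ k-1 ∧ q = pvPos n k d j := by
  unfold ringP segP at h
  simp only [List.map_flatMap, List.map_map, List.mem_flatMap, List.mem_map] at h
  obtain ⟨d, hd, j, hj, rfl⟩ := h
  rw [PySem.List.mem_pyRange_one] at hd hj
  exact ⟨d, j, by omega, by omega, by omega, by omega, rfl⟩

theorem ringProp_of_mem_keys (n k : Int) (h1 : 1 ≤ k) {q : Int × Int}
    (h : q ∈ (ringP n k).map (fun r => r.1)) : RingProp n k q := by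
  obtain ⟨d, j, hd, hd5, hj, hjk, rfl⟩ := mem_ring_keys n k h
  exact ringProp_pos n k d j h1 hd hd5 hj hjk

theorem pairwise_gt_pyRange_neg_one (a b : Int) :
    (PySem.List.pyRange a b (-1)).Pairwise (· > ·) := by
  rw [PySem.List.pyRange_neg_one_eq_reverse, List.pairwise_reverse]
  exact PySem.List.pairwise_lt_pyRange_one (b+1) (a+1)

theorem ring_keys_nodup (n k : Int) (h1 : 1 ≤ k) :
    ((ringP n k).map (fun r => r.1)).Nodup := by
  unfold ringP segP
  rw [List.map_flatMap, List.nodup_flatMap]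
  constructor
  · intro d hd
    rw [PySem.List.mem_pyRange_one] at hd
    rw [List.map_map]
    refine (PySem.List.nodup_pyRange_one 0 k).map_on ?_
    intro j hj j' hj' he
    rw [PySem.List.mem_pyRange_one] at hj hj'
    exact (pos_inj_ring n k d j d j' h1 (by omega) (by omega) (by omega) (by omega)
      (by omega) (by omega) (by omega) (by omega) he).2
  · refine List.Pairwise.imp_of_mem ?_ (PySem.List.pairwise_lt_pyRange_one 0 6)
    intro d d' hdm hdm' hlt q hq hq'
    rw [PySem.List.mem_pyRange_one] at hdm hdm'
    simp only [List.map_map, List.mem_map] at hq hq'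
    obtain ⟨j, hj, rfl⟩ := hq
    obtain ⟨j', hj', he⟩ := hq'
    rw [PySem.List.mem_pyRange_one] at hj hj'
    have := pos_inj_ring n k d' j' d j h1 (by omega) (by omega) (by omega) (by omega)
      (by omega) (by omega) (by omega) (by omega) he
    omega

theorem pairs_keys_nodup (n : Int) : ((pairsP n).map (fun q => q.1)).Nodup := by
  unfold pairsP
  rw [List.map_append]
  apply List.Nodup.append
  · rw [show (ringsP n 0).map (fun q => q.1)
        = (PySem.List.pyRange (n-1) 0 (-1)).flatMap (fun k => (ringP n k).map (fun q => q.1))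
      from by unfold ringsP; rw [List.map_flatMap]]
    rw [List.nodup_flatMap]
    constructor
    · intro k hk
      rw [PySem.List.mem_pyRange_neg_one] at hk
      exact ring_keys_nodup n k (by omega)
    · refine List.Pairwise.imp_of_mem ?_ (pairwise_gt_pyRange_neg_one (n-1) 0)
      intro k k' hk hk' hgt q hq hq'
      rw [PySem.List.mem_pyRange_neg_one] at hk hk'
      exact ringProp_disj n k k' q (by omega) (ringProp_of_mem_keys n k (by omega) hq)
        (ringProp_of_mem_keys n k' (by omega) hq')
  · simp
  · intro q hq hq'
    simp only [List.map_cons, List.map_nil, List.mem_singleton] at hq'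
    subst hq'
    rw [show (ringsP n 0).map (fun q => q.1)
        = (PySem.List.pyRange (n-1) 0 (-1)).flatMap (fun k => (ringP n k).map (fun q => q.1))
      from by unfold ringsP; rw [List.map_flatMap]] at hq
    simp only [List.mem_flatMap] at hq
    obtain ⟨k, hk, hmem⟩ := hq
    rw [PySem.List.mem_pyRange_neg_one] at hk
    exact ringProp_disj n k 0 _ (by omega) (ringProp_of_mem_keys n k (by omega) hmem)
      (ringProp_ctr n)

theorem pairs_val_pos (n : Int) (hn : 2 ≤ n) {p : (Int × Int) × Int}
    (h : p ∈ pairsP n) : 1 ≤ p.2 := by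
  rcases mem_pairs_shape n h with ⟨k, d, j, ⟨h1,h2,h3,h4,h5,h6⟩, rfl⟩ | rfl
  · show 1 ≤ pvNum n k d j
    unfold pvNum
    have hkk : k*(k+1) ≤ (n-1)*n := by nlinarith
    have hdk : 0 ≤ d*k := by positivity
    omega
  · show 1 ≤ 3*n*(n-1)+1
    nlinarith
def PvBad (n : Int) (bee : PySem.Dict (Int × Int) Int) (q : Int × Int) : Prop :=
  pvInRange q.1 q.2 n = false ∨ ∃ v, bee.get? q = some v ∧ v ≠ 0

theorem probe_found (n : Int) (t : Nat) (dir y x ny nx : Int) (bee : PySem.Dict (Int × Int) Int)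
    (hin : pvInRange ny nx n = true) (habs : bee.get? (ny, nx) = none) :
    pvProbe n (t+1) dir y x ny nx bee = (true, dir, ny, nx, bee.insert (ny, nx) 0) := by
  simp [pvProbe, pvDget, hin, habs, PySem.Dict.get?_insert_self]

theorem probe_bad_found (n : Int) (t : Nat) (dir dir' y x ny nx : Int)
    (bee : PySem.Dict (Int × Int) Int)
    (hbad : PvBad n bee (ny, nx)) (hdir : dir' = PySem.Int.mod (dir+1) 6)
    (hin : pvInRange (y + pvDy dir') (x + pvDx dir') n = true)
    (habs : bee.get? (y + pvDy dir', x + pvDx dir') = none) :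
    pvProbe n (t+1) dir y x ny nx bee =
      (true, dir', y + pvDy dir', x + pvDx dir',
       bee.insert (y + pvDy dir', x + pvDx dir') 0) := by
  rcases hbad with hoor | ⟨v, hv, hv0⟩
  · simp only [pvProbe]
    rw [← hdir]
    simp [pvDget, hoor, hin, habs, PySem.Dict.get?_insert_self]
  · have h1 : (v != 0) = true := by simpa using hv0
    simp only [pvProbe]
    rw [← hdir]
    simp [pvDget, hv, h1, hin, habs, PySem.Dict.get?_insert_self]

theorem probe_bad_bad (n : Int) (t : Nat) (dir dir' y x ny nx : Int)
    (bee : PySem.Dict (Int × Int) Int)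
    (hbad : PvBad n bee (ny, nx)) (hdir : dir' = PySem.Int.mod (dir+1) 6)
    (hbad' : PvBad n bee (y + pvDy dir', x + pvDx dir')) :
    pvProbe n (t+1) dir y x ny nx bee =
      pvProbe n t dir' y x (y + pvDy dir') (x + pvDx dir') bee := by
  rcases hbad with hoor | ⟨v, hv, hv0⟩ <;> rcases hbad' with hoor' | ⟨v', hv', hv0'⟩
  · simp only [pvProbe]
    rw [← hdir]
    simp [pvDget, hoor, hoor']
  · have h2 : (v' == 0) = false := by simpa using hv0'
    simp only [pvProbe]
    rw [← hdir]
    simp [pvDget, hoor, hv', h2]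
  · have h1 : (v != 0) = true := by simpa using hv0
    simp only [pvProbe]
    rw [← hdir]
    simp [pvDget, hv, h1, hoor']
  · have h1 : (v != 0) = true := by simpa using hv0
    have h2 : (v' == 0) = false := by simpa using hv0'
    simp only [pvProbe]
    rw [← hdir]
    simp [pvDget, hv, h1, hv', h2]
theorem pvMod_small (a : Int) (h0 : 0 ≤ a) (h6 : a < 6) : PySem.Int.mod a 6 = a := by
  unfold PySem.Int.mod
  rw [Int.fmod_eq_emod]
  split
  · omega
  · omega

theorem mk_insert_fresh (L : List ((Int × Int) × Int)) (q : Int × Int) (v : Int)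
    (h : q ∉ L.map (fun r => r.1)) :
    (PySem.Dict.mk L).insert q v = PySem.Dict.mk (L ++ [(q, v)]) := by
  apply PySem.Dict.ext
  rw [PySem.Dict.items_insert_of_not_contains]
  rw [PySem.Dict.contains_eq_decide_mem_keys, PySem.Dict.keys_mk]
  simpa using h

theorem mk_get?_mem (L : List ((Int × Int) × Int)) (q : Int × Int) (v : Int)
    (hnd : (L.map (fun r => r.1)).Nodup) (h : (q, v) ∈ L) :
    (PySem.Dict.mk L).get? q = some v := by
  apply PySem.Dict.get?_of_mem_items _ h
  rw [PySem.Dict.keys_mk]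
  exact hnd

theorem mk_get?_none (L : List ((Int × Int) × Int)) (q : Int × Int)
    (h : q ∉ L.map (fun r => r.1)) : (PySem.Dict.mk L).get? q = none := by
  rw [PySem.Dict.get?_eq_none_iff_not_mem_keys, PySem.Dict.keys_mk]
  exact h

theorem pair_mem_pairs (n k d j : Int) (hv : PvValid n k d j) : pvPair n k d j ∈ pairsP n := by
  obtain ⟨h1,h2,h3,h4,h5,h6⟩ := hv
  unfold pairsP ringsP ringP segP
  refine List.mem_append_left _ ?_
  simp only [List.mem_flatMap, List.mem_map]
  exact ⟨k, by rw [PySem.List.mem_pyRange_neg_one]; omega,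
    ⟨d, by rw [PySem.List.mem_pyRange_one]; omega,
      ⟨j, by rw [PySem.List.mem_pyRange_one]; omega, rfl⟩⟩⟩

theorem pairs_bad (n : Int) (hn : 2 ≤ n) (k d j : Int) (hv : PvValid n k d j) :
    PvBad n (PySem.Dict.mk (pairsP n)) (pvPos n k d j) :=
  Or.inr ⟨pvNum n k d j,
    mk_get?_mem _ _ _ (pairs_keys_nodup n) (pair_mem_pairs n k d j hv),
    by
      have := pairs_val_pos n hn (pair_mem_pairs n k d j hv)
      simp only [pvPair] at this
      omega⟩

theorem inRange_ctr (n : Int) (hn : 2 ≤ n) : pvInRange (2*(n-1)) 0 n = true := by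
  simp [pvInRange]
  omega

theorem center_nbr (n t : Int) (h0 : 0 ≤ t) (h5 : t ≤ 5) :
    ((2*(n-1)) + pvDy t, (0:Int) + pvDx t)
      = pvPos n 1 (if t ≤ 3 then t + 2 else t - 4) 0 := by
  interval_cases t <;>
    simp [pvPos, pvSS, pvDy, pvDx, pvDys, pvDxs, PySem.List.pyGetD] <;> omega

theorem loopA_center (n : Int) (hn : 2 ≤ n) (f : Nat) (bee : PySem.Dict (Int × Int) Int)
    (hbee : bee.insert (2*(n-1), 0) (3*n*(n-1)+1) = PySem.Dict.mk (pairsP n)) :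
    pvLoop n (f+1) bee (3*n*(n-1)+1) 0 (2*(n-1)) 0 = PySem.Dict.mk (pairsP n) := by
  have hval : ∀ d : Int, 0 ≤ d → d ≤ 5 → PvValid n 1 d 0 := by
    intro d hd hd5; exact ⟨by omega, by omega, hd, hd5, by omega, by omega⟩
  have hbad : ∀ t : Int, 0 ≤ t → t ≤ 5 →
      PvBad n (PySem.Dict.mk (pairsP n)) ((2*(n-1)) + pvDy t, 0 + pvDx t) := by
    intro t h0 h5
    rw [center_nbr n t h0 h5]
    exact pairs_bad n hn 1 _ 0 (hval _ (by split <;> omega) (by split <;> omega))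
  simp only [pvLoop]
  rw [hbee]
  rw [probe_bad_bad n 5 0 1 (2*(n-1)) 0 _ _ _ (hbad 0 (by omega) (by omega)) (by decide)
        (hbad 1 (by omega) (by omega)),
      probe_bad_bad n 4 1 2 (2*(n-1)) 0 _ _ _ (hbad 1 (by omega) (by omega)) (by decide)
        (hbad 2 (by omega) (by omega)),
      probe_bad_bad n 3 2 3 (2*(n-1)) 0 _ _ _ (hbad 2 (by omega) (by omega)) (by decide)
        (hbad 3 (by omega) (by omega)),
      probe_bad_bad n 2 3 4 (2*(n-1)) 0 _ _ _ (hbad 3 (by omega) (by omega)) (by decide)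
        (hbad 4 (by omega) (by omega)),
      probe_bad_bad n 1 4 5 (2*(n-1)) 0 _ _ _ (hbad 4 (by omega) (by omega)) (by decide)
        (hbad 5 (by omega) (by omega)),
      probe_bad_bad n 0 5 0 (2*(n-1)) 0 _ _ _ (hbad 5 (by omega) (by omega)) (by decide)
        (hbad 0 (by omega) (by omega))]
  simp [pvProbe]
theorem step_seg (n k d j : Int) (h3 : 0 ≤ d) (h4 : d ≤ 5) :
    pvPos n k d (j+1) = ((pvPos n k d j).1 + pvDy d, (pvPos n k d j).2 + pvDx d) := by
  unfold pvPos
  simp only [Prod.ext_iff]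
  constructor <;> ring

theorem step_corner (n k d : Int) (h3 : 0 ≤ d) (h4 : d ≤ 4) :
    pvPos n k (d+1) 0 = ((pvPos n k d (k-1)).1 + pvDy d, (pvPos n k d (k-1)).2 + pvDx d) := by
  unfold pvPos pvSS
  interval_cases d <;> simp [pvDy, pvDx, pvDys, pvDxs, PySem.List.pyGetD, Prod.ext_iff] <;> omega

theorem step_top (n k : Int) :
    pvPos n k 0 0 = ((pvPos n k 5 (k-1)).1 + pvDy 5, (pvPos n k 5 (k-1)).2 + pvDx 5) := by
  unfold pvPos pvSS
  simp [pvDy, pvDx, pvDys, pvDxs, PySem.List.pyGetD]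
  omega

theorem step_inward (n k : Int) :
    pvPos n (k-1) 0 0 = ((pvPos n k 5 (k-1)).1 + pvDy 0, (pvPos n k 5 (k-1)).2 + pvDx 0) := by
  unfold pvPos pvSS
  simp [pvDy, pvDx, pvDys, pvDxs, PySem.List.pyGetD]
  omega

theorem step_overshoot (n k d : Int) (h3 : 1 ≤ d) (h4 : d ≤ 5) :
    pvPos n (k+1) d 1 = ((pvPos n k d 0).1 + pvDy (d-1), (pvPos n k d 0).2 + pvDx (d-1)) := by
  unfold pvPos pvSS
  interval_cases d <;> simp [pvDy, pvDx, pvDys, pvDxs, PySem.List.pyGetD, Prod.ext_iff] <;> omega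

theorem step_center (n : Int) :
    ((2*(n-1) : Int), (0:Int)) = ((pvPos n 1 5 0).1 + pvDy 0, (pvPos n 1 5 0).2 + pvDx 0) := by
  unfold pvPos pvSS
  simp [pvDy, pvDx, pvDys, pvDxs, PySem.List.pyGetD]
  omega

theorem num_seg (n k d j : Int) : pvNum n k d (j+1) = pvNum n k d j + 1 := by
  unfold pvNum; ring

theorem num_corner (n k d : Int) : pvNum n k (d+1) 0 = pvNum n k d (k-1) + 1 := by
  unfold pvNum; ring

theorem num_inward (n k : Int) : pvNum n (k-1) 0 0 = pvNum n k 5 (k-1) + 1 := by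
  unfold pvNum; ring

theorem num_center (n : Int) : 3*n*(n-1)+1 = pvNum n 1 5 0 + 1 := by
  unfold pvNum; ring

theorem num_pos (n k d j : Int) (hn : 2 ≤ n) (hv : PvValid n k d j) : 1 ≤ pvNum n k d j := by
  have := pairs_val_pos n hn (pair_mem_pairs n k d j hv)
  simpa [pvPair] using this

theorem remaining_pos (n k d j : Int) (hv : PvValid n k d j) :
    1 ≤ 3*k*(k+1)+1-(d*k+j) := by
  obtain ⟨h1,h2,h3,h4,h5,h6⟩ := hv
  nlinarith

theorem nodup_split_facts (n : Int) (L M : List ((Int × Int) × Int)) (q : Int × Int) (v : Int)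
    (hsplit : pairsP n = L ++ (q, v) :: M) :
    ((L ++ [(q, v)]).map (fun r => r.1)).Nodup ∧
      (∀ p ∈ M, p.1 ∉ (L ++ [(q, v)]).map (fun r => r.1)) := by
  have h := pairs_keys_nodup n
  rw [hsplit, show L ++ (q, v) :: M = (L ++ [(q, v)]) ++ M by simp, List.map_append] at h
  exact ⟨h.of_append_left, fun p hp hmem =>
    List.disjoint_of_nodup_append h hmem (List.mem_map_of_mem hp)⟩

theorem mem_pref_seg (n k d j d' j' : Int) (hd' : 0 ≤ d') (hdd : d' < d)
    (hj' : 0 ≤ j') (hjk : j' ≤ k - 1) : pvPair n k d' j' ∈ prefP n k d j := by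
  unfold prefP segP
  refine List.mem_append_left _ (List.mem_append_right _ ?_)
  simp only [List.mem_flatMap, List.mem_map]
  exact ⟨d', by rw [PySem.List.mem_pyRange_one]; omega,
    ⟨j', by rw [PySem.List.mem_pyRange_one]; omega, rfl⟩⟩

theorem mem_pref_ring (n k d j k' d' j' : Int) (hk : k < k') (hk' : k' ≤ n - 1)
    (hd' : 0 ≤ d') (hd5 : d' ≤ 5) (hj' : 0 ≤ j') (hjk : j' ≤ k' - 1) :
    pvPair n k' d' j' ∈ prefP n k d j := by
  unfold prefP ringsP ringP segP
  refine List.mem_append_left _ (List.mem_append_left _ ?_)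
  simp only [List.mem_flatMap, List.mem_map]
  exact ⟨k', by rw [PySem.List.mem_pyRange_neg_one]; omega,
    ⟨d', by rw [PySem.List.mem_pyRange_one]; omega,
      ⟨j', by rw [PySem.List.mem_pyRange_one]; omega, rfl⟩⟩⟩
theorem loopA_main (n : Int) (hn : 2 ≤ n) :
    ∀ (f : Nat) (k d j : Int) (bee : PySem.Dict (Int × Int) Int), PvValid n k d j →
    (3*k*(k+1) + 1 - (d*k + j)).toNat ≤ f →
    bee.insert (pvPos n k d j) (pvNum n k d j)
      = PySem.Dict.mk (prefP n k d j ++ [pvPair n k d j]) →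
    pvLoop n f bee (pvNum n k d j) (pvArr d j) (pvPos n k d j).1 (pvPos n k d j).2
      = PySem.Dict.mk (pairsP n) := by
  intro f
  induction f with
  | zero =>
    intro k d j bee hv hf _
    have := remaining_pos n k d j hv
    omega
  | succ f ih =>
    intro k d j bee hv hf hbee
    obtain ⟨h1,h2,h3,h4,h5,h6⟩ := hv
    have hs0 : sfxP n k d j = pvPair n k d j :: sfxP n k d (j+1) := sfx_cons n k d j (by omega)
    have hsplit : pairsP n = (prefP n k d j ++ [pvPair n k d j]) ++ sfxP n k d (j+1) := by
      rw [split_pairs n k d j (by omega) (by omega) (by omega) (by omega) (by omega) (by omega),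
        hs0]
      simp
    set L1 := prefP n k d j ++ [pvPair n k d j] with hL1
    have hrem := remaining_pos n k d j ⟨h1,h2,h3,h4,h5,h6⟩
    -- generic advance to the next cell (k2,d2,j2) after a successful probe
    have hadv : ∀ (k2 d2 j2 : Int), PvValid n k2 d2 j2 →
        sfxP n k d (j+1) = pvPair n k2 d2 j2 :: sfxP n k2 d2 (j2+1) →
        pvNum n k2 d2 j2 = pvNum n k d j + 1 →
        3*k2*(k2+1)+1-(d2*k2+j2) = 3*k*(k+1)+1-(d*k+j) - 1 →
        pvLoop n f ((PySem.Dict.mk L1).insert (pvPos n k2 d2 j2) 0) (pvNum n k d j + 1)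
          (pvArr d2 j2) (pvPos n k2 d2 j2).1 (pvPos n k2 d2 j2).2
          = PySem.Dict.mk (pairsP n) := by
      intro k2 d2 j2 hv2 hsfx2 hnum2 hrem2
      obtain ⟨g1,g2,g3,g4,g5,g6⟩ := hv2
      have hsp2 : pairsP n = L1 ++ (pvPos n k2 d2 j2, pvNum n k2 d2 j2) :: sfxP n k2 d2 (j2+1) := by
        rw [hsplit, hsfx2]; rfl
      have hpref2 : prefP n k2 d2 j2 = L1 := by
        have h' : pairsP n
            = (prefP n k2 d2 j2) ++ (pvPos n k2 d2 j2, pvNum n k2 d2 j2) :: sfxP n k2 d2 (j2+1) := by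
          rw [split_pairs n k2 d2 j2 (by omega) (by omega) (by omega) (by omega) (by omega)
            (by omega), sfx_cons n k2 d2 j2 (by omega)]
          rfl
        exact List.append_cancel_right (h'.symm.trans hsp2)
      have hnd := nodup_split_facts n L1 _ _ _ hsp2
      have hfresh : pvPos n k2 d2 j2 ∉ L1.map (fun r => r.1) := by
        intro hmem
        have h := hnd.1
        rw [List.map_append] at h
        exact List.disjoint_of_nodup_append h hmem (by simp)
      have hins : ((PySem.Dict.mk L1).insert (pvPos n k2 d2 j2) 0).insert (pvPos n k2 d2 j2)
          (pvNum n k2 d2 j2) = PySem.Dict.mk (prefP n k2 d2 j2 ++ [pvPair n k2 d2 j2]) := by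
        rw [PySem.Dict.insert_insert_self, mk_insert_fresh _ _ _ hfresh, hpref2]
        rfl
      have hrp2 := remaining_pos n k2 d2 j2 ⟨g1,g2,g3,g4,g5,g6⟩
      have := ih k2 d2 j2 _ ⟨g1,g2,g3,g4,g5,g6⟩ (by omega) hins
      rw [hnum2] at this
      exact this
    have hnd_all : (L1.map (fun r => r.1)).Nodup := by
      have h := pairs_keys_nodup n
      rw [hsplit, List.map_append] at h
      exact h.of_append_left
    -- visited candidates are bad
    have hbadL : ∀ (k' d' j' : Int), PvValid n k' d' j' →
        pvPair n k' d' j' ∈ L1 → PvBad n (PySem.Dict.mk L1) (pvPos n k' d' j') := by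
      intro k' d' j' hv' hmem
      exact Or.inr ⟨pvNum n k' d' j', mk_get?_mem _ _ _ hnd_all hmem, by
        have := num_pos n k' d' j' hn hv'; omega⟩
    -- the cell about to be visited is not yet in the dict
    have hfreshL : ∀ (q : Int × Int) (v : Int) (M : List ((Int × Int) × Int)),
        pairsP n = L1 ++ (q, v) :: M → (PySem.Dict.mk L1).get? q = none := by
      intro q v M hsp
      apply mk_get?_none
      intro hmem
      have h := pairs_keys_nodup n
      rw [hsp, show L1 ++ (q,v) :: M = (L1 ++ [(q,v)]) ++ M by simp, List.map_append,
        List.map_append] at h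
      exact List.disjoint_of_nodup_append h.of_append_left hmem (by simp)
    simp only [pvLoop, Prod.mk.eta]
    rw [hbee]
    by_cases hcase : j = 0 ∧ d ≠ 0
    · -- turning cell: the loop arrives with direction d-1, turns once (or twice at (1,5,0))
      obtain ⟨hj0, hd0⟩ := hcase
      subst hj0
      rw [show pvArr d 0 = d - 1 from by unfold pvArr; split_ifs <;> omega]
      have hbad1 : PvBad n (PySem.Dict.mk L1)
          ((pvPos n k d 0).1 + pvDy (d-1), (pvPos n k d 0).2 + pvDx (d-1)) := by
        by_cases hkn : k = n - 1
        · subst hkn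
          exact Or.inl (inRange_overshoot n d hn (by omega) (by omega))
        · have hst := step_overshoot n k d (by omega) (by omega)
          simp only [Prod.ext_iff] at hst
          rw [← hst.1, ← hst.2, Prod.mk.eta]
          exact hbadL (k+1) d 1 ⟨by omega, by omega, by omega, by omega, by omega, by omega⟩
            (List.mem_append_left _ (mem_pref_ring n k d 0 (k+1) d 1 (by omega) (by omega)
              (by omega) (by omega) (by omega) (by omega)))
      have hdir2 : d = PySem.Int.mod ((d-1)+1) 6 := by
        rw [show d - 1 + 1 = d from by ring, pvMod_small d (by omega) (by omega)]
      by_cases hk2 : 2 ≤ k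
      · -- II.1: next cell is (k, d, 1)
        have hst2 := step_seg n k d 0 h3 h4
        simp only [Prod.ext_iff] at hst2
        have hsfx2 : sfxP n k d (0+1) = pvPair n k d (0+1) :: sfxP n k d (0+1+1) :=
          sfx_cons n k d (0+1) (by omega)
        have hsp2 : pairsP n = L1 ++ (pvPos n k d (0+1), pvNum n k d (0+1)) :: sfxP n k d (0+1+1) := by
          rw [hsplit, hsfx2]; rfl
        rw [probe_bad_found n 5 (d-1) d _ _ _ _ _ hbad1 hdir2
          (by rw [← hst2.1, ← hst2.2]
              exact inRange_pos n k d (0+1) hn ⟨by omega, by omega, by omega, by omega, by omega, by omega⟩)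
          (by rw [← hst2.1, ← hst2.2, Prod.mk.eta]
              exact hfreshL _ _ _ hsp2)]
        rw [← hst2.1, ← hst2.2, Prod.mk.eta]
        have H := hadv k d (0+1) ⟨by omega, by omega, by omega, by omega, by omega, by omega⟩
          hsfx2 (num_seg n k d 0) (by ring)
        rw [show pvArr d (0+1) = d from by unfold pvArr; split_ifs <;> omega] at H
        exact H
      · -- k = 1, every cell is a corner
        have hk1 : k = 1 := by omega
        subst hk1
        by_cases hd5 : d ≤ 4
        · -- II.2: next cell is (1, d+1, 0)
          have hst2 := step_corner n 1 d h3 hd5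
          rw [show (1:Int) - 1 = 0 from by ring] at hst2
          simp only [Prod.ext_iff] at hst2
          have hsfx2 : sfxP n 1 d (0+1) = pvPair n 1 (d+1) 0 :: sfxP n 1 (d+1) (0+1) := by
            rw [show (0:Int)+1 = 1 from by ring, show sfxP n 1 d 1 = sfxP n 1 d 1 from rfl]
            rw [show sfxP n 1 d 1 = sfxP n 1 (d+1) 0 from by
                  have := sfx_seg_end n 1 d hd5
                  simpa using this]
            exact sfx_cons n 1 (d+1) 0 (by omega)
          have hsp2 : pairsP n = L1 ++ (pvPos n 1 (d+1) 0, pvNum n 1 (d+1) 0) :: sfxP n 1 (d+1) (0+1) := by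
            rw [hsplit, hsfx2]; rfl
          rw [probe_bad_found n 5 (d-1) d _ _ _ _ _ hbad1 hdir2
            (by rw [← hst2.1, ← hst2.2]
                exact inRange_pos n 1 (d+1) 0 hn ⟨by omega, by omega, by omega, by omega, by omega, by omega⟩)
            (by rw [← hst2.1, ← hst2.2, Prod.mk.eta]
                exact hfreshL _ _ _ hsp2)]
          rw [← hst2.1, ← hst2.2, Prod.mk.eta]
          have H := hadv 1 (d+1) 0 ⟨by omega, by omega, by omega, by omega, by omega, by omega⟩
            hsfx2 (by rw [num_corner n 1 d, show (1:Int)-1 = 0 from by ring]) (by ring)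
          rw [show pvArr (d+1) 0 = d from by unfold pvArr; split_ifs <;> omega] at H
          exact H
        · -- II.3: cell (1,5,0) — two turns, then the center
          have hd5' : d = 5 := by omega
          subst hd5'
          have hstTop := step_top n 1
          rw [show (1:Int) - 1 = 0 from by ring] at hstTop
          simp only [Prod.ext_iff] at hstTop
          have hbad2 : PvBad n (PySem.Dict.mk L1)
              ((pvPos n 1 5 0).1 + pvDy 5, (pvPos n 1 5 0).2 + pvDx 5) := by
            rw [← hstTop.1, ← hstTop.2, Prod.mk.eta]
            exact hbadL 1 0 0 ⟨by omega, by omega, by omega, by omega, by omega, by omega⟩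
              (List.mem_append_left _ (mem_pref_seg n 1 5 0 0 0 (by omega) (by omega)
                (by omega) (by omega)))
          have hstC := step_center n
          simp only [Prod.ext_iff] at hstC
          have hspC : pairsP n = L1 ++ ((2*(n-1), 0), 3*n*(n-1)+1) :: [] := by
            rw [hsplit, show (0:Int)+1 = 1 from by ring, sfx_last n]
            rfl
          rw [probe_bad_bad n 5 (5-1) 5 _ _ _ _ _ hbad1 hdir2 hbad2,
              probe_bad_found n 4 5 0 (pvPos n 1 5 0).1 (pvPos n 1 5 0).2 _ _ _ hbad2 (by decide)
            (by rw [← hstC.1, ← hstC.2]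
                exact inRange_ctr n hn)
            (by rw [← hstC.1, ← hstC.2]
                exact hfreshL _ _ _ hspC)]
          rw [← hstC.1, ← hstC.2]
          -- fuel: two cells remain, so f ≥ 1
          obtain ⟨f', rfl⟩ : ∃ f', f = f' + 1 := ⟨f - 1, by omega⟩
          have hctr_fresh : ((2*(n-1):Int), (0:Int)) ∉ L1.map (fun r => r.1) := by
            intro hmem
            have h := pairs_keys_nodup n
            rw [hspC, show L1 ++ ((2*(n-1), 0), 3*n*(n-1)+1) :: ([] : List ((Int × Int) × Int))
                = (L1 ++ [((2*(n-1), 0), 3*n*(n-1)+1)]) ++ [] by simp, List.map_append,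
              List.map_append] at h
            exact List.disjoint_of_nodup_append (by simpa using h.of_append_left) hmem (by simp)
          have hbee2 : (((PySem.Dict.mk L1).insert (2*(n-1), 0) 0).insert (2*(n-1), 0)
              (3*n*(n-1)+1)) = PySem.Dict.mk (pairsP n) := by
            rw [PySem.Dict.insert_insert_self, mk_insert_fresh _ _ _ hctr_fresh, hspC]
          have H := loopA_center n hn f' _ hbee2
          rw [num_center n] at H
          exact H
    · -- CASE I: the loop arrives with direction d
      have harr : pvArr d j = d := by
        unfold pvArr; split_ifs <;> omega
      rw [harr]
      by_cases hjk : j + 1 ≤ k - 1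
      · -- I.1: mid-segment, next cell is (k, d, j+1)
        have hst2 := step_seg n k d j h3 h4
        simp only [Prod.ext_iff] at hst2
        have hsfx2 : sfxP n k d (j+1) = pvPair n k d (j+1) :: sfxP n k d (j+1+1) :=
          sfx_cons n k d (j+1) (by omega)
        have hsp2 : pairsP n = L1 ++ (pvPos n k d (j+1), pvNum n k d (j+1)) :: sfxP n k d (j+1+1) := by
          rw [hsplit, hsfx2]; rfl
        rw [probe_found n 5 d _ _ _ _ _
          (by rw [← hst2.1, ← hst2.2]
              exact inRange_pos n k d (j+1) hn ⟨by omega, by omega, by omega, by omega, by omega, by omega⟩)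
          (by rw [← hst2.1, ← hst2.2, Prod.mk.eta]
              exact hfreshL _ _ _ hsp2)]
        rw [← hst2.1, ← hst2.2, Prod.mk.eta]
        have H := hadv k d (j+1) ⟨by omega, by omega, by omega, by omega, by omega, by omega⟩
          hsfx2 (num_seg n k d j) (by ring)
        rw [show pvArr d (j+1) = d from by unfold pvArr; split_ifs <;> omega] at H
        exact H
      · have hjk1 : j = k - 1 := by omega
        subst hjk1
        by_cases hd4 : d ≤ 4
        · -- I.2: corner, next cell is (k, d+1, 0)
          have hst2 := step_corner n k d h3 hd4
          simp only [Prod.ext_iff] at hst2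
          have hsfx2 : sfxP n k d (k-1+1) = pvPair n k (d+1) 0 :: sfxP n k (d+1) (0+1) := by
            rw [show k-1+1 = k from by ring, sfx_seg_end n k d hd4]
            exact sfx_cons n k (d+1) 0 (by omega)
          have hsp2 : pairsP n = L1 ++ (pvPos n k (d+1) 0, pvNum n k (d+1) 0) :: sfxP n k (d+1) (0+1) := by
            rw [hsplit, hsfx2]; rfl
          rw [probe_found n 5 d _ _ _ _ _
            (by rw [← hst2.1, ← hst2.2]
                exact inRange_pos n k (d+1) 0 hn ⟨by omega, by omega, by omega, by omega, by omega, by omega⟩)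
            (by rw [← hst2.1, ← hst2.2, Prod.mk.eta]
                exact hfreshL _ _ _ hsp2)]
          rw [← hst2.1, ← hst2.2, Prod.mk.eta]
          have H := hadv k (d+1) 0 ⟨by omega, by omega, by omega, by omega, by omega, by omega⟩
            hsfx2 (num_corner n k d) (by ring)
          rw [show pvArr (d+1) 0 = d from by unfold pvArr; split_ifs <;> omega] at H
          exact H
        · -- I.3: last cell of ring k (k ≥ 2), one turn, inward to (k-1, 0, 0)
          have hd5' : d = 5 := by omega
          subst hd5'
          have hk2 : 2 ≤ k := by
            rcases (not_and_or.mp hcase) with hj | hd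
            · omega
            · omega
          have hstTop := step_top n k
          simp only [Prod.ext_iff] at hstTop
          have hbadTop : PvBad n (PySem.Dict.mk L1)
              ((pvPos n k 5 (k-1)).1 + pvDy 5, (pvPos n k 5 (k-1)).2 + pvDx 5) := by
            rw [← hstTop.1, ← hstTop.2, Prod.mk.eta]
            exact hbadL k 0 0 ⟨by omega, by omega, by omega, by omega, by omega, by omega⟩
              (List.mem_append_left _ (mem_pref_seg n k 5 (k-1) 0 0 (by omega) (by omega)
                (by omega) (by omega)))
          have hstIn := step_inward n k
          simp only [Prod.ext_iff] at hstIn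
          have hsfx2 : sfxP n k 5 (k-1+1) = pvPair n (k-1) 0 0 :: sfxP n (k-1) 0 (0+1) := by
            rw [show k-1+1 = k from by ring, sfx_ring_end n k hk2]
            exact sfx_cons n (k-1) 0 0 (by omega)
          have hsp2 : pairsP n = L1 ++ (pvPos n (k-1) 0 0, pvNum n (k-1) 0 0) :: sfxP n (k-1) 0 (0+1) := by
            rw [hsplit, hsfx2]; rfl
          rw [probe_bad_found n 5 5 0 _ _ _ _ _ hbadTop (by decide)
            (by rw [← hstIn.1, ← hstIn.2]
                exact inRange_pos n (k-1) 0 0 hn ⟨by omega, by omega, by omega, by omega, by omega, by omega⟩)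
            (by rw [← hstIn.1, ← hstIn.2, Prod.mk.eta]
                exact hfreshL _ _ _ hsp2)]
          rw [← hstIn.1, ← hstIn.2, Prod.mk.eta]
          have H := hadv (k-1) 0 0 ⟨by omega, by omega, by omega, by omega, by omega, by omega⟩
            hsfx2 (num_inward n k) (by ring)
          rw [show pvArr 0 0 = 0 from by unfold pvArr; split_ifs <;> omega] at H
          exact H
theorem mk_insert_batch (n : Int) (P Q R : List ((Int × Int) × Int))
    (hsplit : pairsP n = (P ++ Q) ++ R) :
    Q.foldl (fun (b : PySem.Dict (Int × Int) Int) p => b.insert p.1 p.2) (PySem.Dict.mk P)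
      = PySem.Dict.mk (P ++ Q) := by
  have hnd : ((P ++ Q).map (fun r => r.1)).Nodup := by
    have h := pairs_keys_nodup n
    rw [hsplit, List.map_append] at h
    exact h.of_append_left
  rw [List.map_append] at hnd
  apply PySem.Dict.ext
  have := PySem.Dict.items_foldl_insert_fresh Q (fun p => p.1) (fun p => p.2)
    (PySem.Dict.mk P)
    (by
      intro a ha
      rw [PySem.Dict.contains_eq_decide_mem_keys, PySem.Dict.keys_mk]
      simp only [decide_eq_false_iff_not]
      exact fun hmem => List.disjoint_of_nodup_append hnd hmem (List.mem_map_of_mem ha))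
    (hnd.of_append_right)
  simpa using this

theorem B_walk (d : Int) (m : Nat) :
    ∀ (bee : PySem.Dict (Int × Int) Int) (num y x : Int),
    (PySem.List.pyRange 0 m 1).foldl
      (fun (s : PySem.Dict (Int × Int) Int × Int × Int × Int) _ =>
        (s.1.insert (s.2.2.1, s.2.2.2) s.2.1, s.2.1 + 1, s.2.2.1 + pvDy d, s.2.2.2 + pvDx d))
      (bee, num, y, x)
      = ((PySem.List.pyRange 0 m 1).foldl
          (fun (b : PySem.Dict (Int × Int) Int) i =>
            b.insert (y + i * pvDy d, x + i * pvDx d) (num + i)) bee,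
         num + m, y + m * pvDy d, x + m * pvDx d) := by
  induction m with
  | zero =>
    intro bee num y x
    rw [show ((0:Nat):Int) = 0 from rfl, PySem.List.pyRange_one_eq_nil (le_refl (0:Int))]
    simp
  | succ m ihm =>
    intro bee num y x
    rw [show ((m+1 : Nat) : Int) = (m : Int) + 1 from by push_cast; ring,
      PySem.List.pyRange_one_succ_right (by positivity : (0:Int) ≤ (m:Int)), List.foldl_append,
      List.foldl_append, ihm]
    simp only [List.foldl_cons, List.foldl_nil]
    refine Prod.ext ?_ (Prod.ext ?_ (Prod.ext ?_ ?_)) <;> simp <;> ring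
theorem B_seg (n k d : Int) (hd0 : 0 ≤ d) (hd5 : d ≤ 5) (hk : 1 ≤ k)
    (P R : List ((Int × Int) × Int))
    (hsplit : pairsP n = (P ++ segP n k d) ++ R) :
    (PySem.List.pyRange 0 k 1).foldl
      (fun (s : PySem.Dict (Int × Int) Int × Int × Int × Int) _ =>
        (s.1.insert (s.2.2.1, s.2.2.2) s.2.1, s.2.1 + 1, s.2.2.1 + pvDy d, s.2.2.2 + pvDx d))
      (PySem.Dict.mk P, pvNum n k d 0, (pvSS n k d).1, (pvSS n k d).2)
      = (PySem.Dict.mk (P ++ segP n k d), pvNum n k d 0 + k,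
         (pvSS n k d).1 + k * pvDy d, (pvSS n k d).2 + k * pvDx d) := by
  have hcast : ((k.toNat : Int)) = k := Int.toNat_of_nonneg (by omega)
  rw [← hcast, B_walk d k.toNat]
  rw [hcast]
  have hfold : (PySem.List.pyRange 0 k 1).foldl
      (fun (b : PySem.Dict (Int × Int) Int) i =>
        b.insert ((pvSS n k d).1 + i * pvDy d, (pvSS n k d).2 + i * pvDx d) (pvNum n k d 0 + i))
      (PySem.Dict.mk P)
      = (PySem.Dict.mk (P ++ segP n k d)) := by
    have he : (PySem.List.pyRange 0 k 1).foldl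
        (fun (b : PySem.Dict (Int × Int) Int) i =>
          b.insert ((pvSS n k d).1 + i * pvDy d, (pvSS n k d).2 + i * pvDx d) (pvNum n k d 0 + i))
        (PySem.Dict.mk P)
        = (PySem.List.pyRange 0 k 1).foldl
          (fun (b : PySem.Dict (Int × Int) Int) i => b.insert (pvPair n k d i).1 (pvPair n k d i).2)
          (PySem.Dict.mk P) := by
      apply PySem.List.foldl_congr_mem
      intro b i hi
      show b.insert _ _ = b.insert (pvPos n k d i) (pvNum n k d i)
      congr 1
      unfold pvNum
      ring
    rw [he, ← List.foldl_map (f := pvPair n k d)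
      (g := fun (b : PySem.Dict (Int × Int) Int) (p : (Int × Int) × Int) => b.insert p.1 p.2)]
    exact mk_insert_batch n P _ R hsplit
  rw [hfold]
theorem B_ring (n k : Int) (hk1 : 1 ≤ k) (P R : List ((Int × Int) × Int))
    (hsplit : pairsP n = (P ++ ringP n k) ++ R) :
    (PySem.List.pyRange 0 6 1).foldl
      (fun (s : PySem.Dict (Int × Int) Int × Int × Int × Int) d =>
        (PySem.List.pyRange 0 k 1).foldl
          (fun (s : PySem.Dict (Int × Int) Int × Int × Int × Int) _ =>
            (s.1.insert (s.2.2.1, s.2.2.2) s.2.1, s.2.1 + 1,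
             s.2.2.1 + pvDy d, s.2.2.2 + pvDx d)) s)
      (PySem.Dict.mk P, pvNum n k 0 0, 2 * (n - 1) - 2 * k, 0)
      = (PySem.Dict.mk (P ++ ringP n k), pvNum n k 0 0 + 6 * k, 2 * (n - 1) - 2 * k, 0) := by
  have hr : ringP n k = segP n k 0 ++ (segP n k 1 ++ (segP n k 2 ++ (segP n k 3 ++
      (segP n k 4 ++ segP n k 5)))) := by
    simp [ringP, show PySem.List.pyRange 0 6 1 = [0,1,2,3,4,5] from rfl]
  have hsp : ∀ (pre post : List ((Int × Int) × Int)), P ++ ringP n k = pre ++ post →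
      pairsP n = pre ++ (post ++ R) := by
    intro pre post hpp
    rw [hsplit, hpp, List.append_assoc]
  rw [show PySem.List.pyRange 0 6 1 = [0,1,2,3,4,5] from rfl]
  simp only [List.foldl_cons, List.foldl_nil]
  have hB0 := B_seg n k 0 (by omega) (by omega) hk1 P _
    (hsp (P ++ segP n k 0) (segP n k 1 ++ (segP n k 2 ++ (segP n k 3 ++ (segP n k 4 ++ segP n k 5)))) (by rw [hr]; simp [List.append_assoc]))
  rw [show (pvSS n k 0).1 = 2*(n-1)-2*k from by unfold pvSS; simp; ring,
      show (pvSS n k 0).2 = (0:Int) from by unfold pvSS; simp] at hB0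
  rw [hB0]
  have hB1 := B_seg n k 1 (by omega) (by omega) hk1 (P ++ segP n k 0) _
    (hsp ((P ++ segP n k 0) ++ segP n k 1) (segP n k 2 ++ (segP n k 3 ++ (segP n k 4 ++ segP n k 5))) (by rw [hr]; simp [List.append_assoc]))
  rw [show pvNum n k 1 0 = pvNum n k 0 0 + k from by unfold pvNum; ring,
      show (pvSS n k 1).1 = 2*(n-1)-2*k + k * pvDy 0 from by
        unfold pvSS; simp [pvDy, pvDys, PySem.List.pyGetD]; try ring,
      show (pvSS n k 1).2 = 0 + k * pvDx 0 from by
        unfold pvSS; simp [pvDx, pvDxs, PySem.List.pyGetD]] at hB1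
  rw [hB1]
  have hB2 := B_seg n k 2 (by omega) (by omega) hk1 ((P ++ segP n k 0) ++ segP n k 1) _
    (hsp (((P ++ segP n k 0) ++ segP n k 1) ++ segP n k 2) (segP n k 3 ++ (segP n k 4 ++ segP n k 5)) (by rw [hr]; simp [List.append_assoc]))
  rw [show pvNum n k 2 0 = pvNum n k 0 0 + k + k from by unfold pvNum; ring,
      show (pvSS n k 2).1 = 2*(n-1)-2*k + k * pvDy 0 + k * pvDy 1 from by
        unfold pvSS; simp [pvDy, pvDys, PySem.List.pyGetD]; try ring,
      show (pvSS n k 2).2 = 0 + k * pvDx 0 + k * pvDx 1 from by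
        unfold pvSS; simp [pvDx, pvDxs, PySem.List.pyGetD]] at hB2
  rw [hB2]
  have hB3 := B_seg n k 3 (by omega) (by omega) hk1 (((P ++ segP n k 0) ++ segP n k 1) ++ segP n k 2) _
    (hsp ((((P ++ segP n k 0) ++ segP n k 1) ++ segP n k 2) ++ segP n k 3) (segP n k 4 ++ segP n k 5) (by rw [hr]; simp [List.append_assoc]))
  rw [show pvNum n k 3 0 = pvNum n k 0 0 + k + k + k from by unfold pvNum; ring,
      show (pvSS n k 3).1 = 2*(n-1)-2*k + k * pvDy 0 + k * pvDy 1 + k * pvDy 2 from by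
        unfold pvSS; simp [pvDy, pvDys, PySem.List.pyGetD]; try ring,
      show (pvSS n k 3).2 = 0 + k * pvDx 0 + k * pvDx 1 + k * pvDx 2 from by
        unfold pvSS; simp [pvDx, pvDxs, PySem.List.pyGetD]; try ring] at hB3
  rw [hB3]
  have hB4 := B_seg n k 4 (by omega) (by omega) hk1 ((((P ++ segP n k 0) ++ segP n k 1) ++ segP n k 2) ++ segP n k 3) _
    (hsp (((((P ++ segP n k 0) ++ segP n k 1) ++ segP n k 2) ++ segP n k 3) ++ segP n k 4) (segP n k 5) (by rw [hr]; simp [List.append_assoc]))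
  rw [show pvNum n k 4 0 = pvNum n k 0 0 + k + k + k + k from by unfold pvNum; ring,
      show (pvSS n k 4).1 = 2*(n-1)-2*k + k * pvDy 0 + k * pvDy 1 + k * pvDy 2 + k * pvDy 3 from by
        unfold pvSS; simp [pvDy, pvDys, PySem.List.pyGetD]; try ring,
      show (pvSS n k 4).2 = 0 + k * pvDx 0 + k * pvDx 1 + k * pvDx 2 + k * pvDx 3 from by
        unfold pvSS; simp [pvDx, pvDxs, PySem.List.pyGetD]; try ring] at hB4
  rw [hB4]
  have hB5 := B_seg n k 5 (by omega) (by omega) hk1 (((((P ++ segP n k 0) ++ segP n k 1) ++ segP n k 2) ++ segP n k 3) ++ segP n k 4) _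
    (hsp ((((((P ++ segP n k 0) ++ segP n k 1) ++ segP n k 2) ++ segP n k 3) ++ segP n k 4) ++ segP n k 5) ([] : List ((Int × Int) × Int)) (by rw [hr]; simp [List.append_assoc]))
  rw [show pvNum n k 5 0 = pvNum n k 0 0 + k + k + k + k + k from by unfold pvNum; ring,
      show (pvSS n k 5).1 = 2*(n-1)-2*k + k * pvDy 0 + k * pvDy 1 + k * pvDy 2 + k * pvDy 3
          + k * pvDy 4 from by
        unfold pvSS; simp [pvDy, pvDys, PySem.List.pyGetD]; try ring,
      show (pvSS n k 5).2 = 0 + k * pvDx 0 + k * pvDx 1 + k * pvDx 2 + k * pvDx 3 + k * pvDx 4 from by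
        unfold pvSS; simp [pvDx, pvDxs, PySem.List.pyGetD]; try ring] at hB5
  rw [hB5]
  refine Prod.ext ?_ (Prod.ext ?_ (Prod.ext ?_ ?_))
  · show PySem.Dict.mk _ = PySem.Dict.mk _
    rw [hr]
    simp [List.append_assoc]
  · show pvNum n k 0 0 + k + k + k + k + k + k = pvNum n k 0 0 + 6 * k
    ring
  · show 2*(n-1)-2*k + k * pvDy 0 + k * pvDy 1 + k * pvDy 2 + k * pvDy 3 + k * pvDy 4
        + k * pvDy 5 = 2 * (n - 1) - 2 * k
    simp [pvDy, pvDys, PySem.List.pyGetD]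
    try ring
  · show 0 + k * pvDx 0 + k * pvDx 1 + k * pvDx 2 + k * pvDx 3 + k * pvDx 4 + k * pvDx 5 = 0
    simp [pvDx, pvDxs, PySem.List.pyGetD]
theorem rings_split (n k : Int) (h1 : 1 ≤ k) (h2 : k ≤ n-1) :
    pairsP n = (ringsP n k ++ ringP n k)
      ++ ((PySem.List.pyRange (k-1) 0 (-1)).flatMap (fun k' => ringP n k') ++ [ctrP n]) := by
  unfold pairsP
  rw [show ringsP n 0 = (ringsP n k ++ ringP n k)
      ++ (PySem.List.pyRange (k-1) 0 (-1)).flatMap (fun k' => ringP n k') from by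
    unfold ringsP
    rw [pyRange_neg_one_append (n-1) k 0 (by omega) (by omega),
      PySem.List.pyRange_neg_one_cons (show (0:Int) < k by omega), List.flatMap_append,
      List.flatMap_cons]
    simp [List.append_assoc]]
  simp [List.append_assoc]

theorem B_rings (n : Int) (hn : 2 ≤ n) : ∀ (m : Nat) (k : Int), k.toNat = m → 0 ≤ k → k ≤ n-1 →
    (PySem.List.pyRange k 0 (-1)).foldl
      (fun (st : PySem.Dict (Int × Int) Int × Int) k' =>
        let s3 := (PySem.List.pyRange 0 6 1).foldl
          (fun (s : PySem.Dict (Int × Int) Int × Int × Int × Int) d =>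
            (PySem.List.pyRange 0 k' 1).foldl
              (fun (s : PySem.Dict (Int × Int) Int × Int × Int × Int) _ =>
                (s.1.insert (s.2.2.1, s.2.2.2) s.2.1, s.2.1 + 1,
                 s.2.2.1 + pvDy d, s.2.2.2 + pvDx d)) s)
          (st.1, st.2, 2 * (n - 1) - 2 * k', 0)
        (s3.1, s3.2.1))
      (PySem.Dict.mk (ringsP n k), pvNum n k 0 0)
      = (PySem.Dict.mk (ringsP n 0), 3*n*(n-1)+1) := by
  intro m
  induction m with
  | zero =>
    intro k hk0 hk1 hk2
    have hkz : k = 0 := by omega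
    subst hkz
    rw [PySem.List.pyRange_neg_one_eq_nil (by omega)]
    simp only [List.foldl_nil]
    congr 1
    unfold pvNum; ring
  | succ m ihm =>
    intro k hk0 hk1 hk2
    have hB := B_ring n k (by omega) (ringsP n k)
      ((PySem.List.pyRange (k-1) 0 (-1)).flatMap (fun k' => ringP n k') ++ [ctrP n])
      (rings_split n k (by omega) (by omega))
    rw [PySem.List.pyRange_neg_one_cons (show (0:Int) < k by omega), List.foldl_cons]
    simp only
    rw [hB]
    simp only
    rw [← ringsP_step n k (by omega) (by omega),
      show pvNum n k 0 0 + 6*k = pvNum n (k-1) 0 0 from by unfold pvNum; ring]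
    exact ihm (k-1) (by omega) (by omega) (by omega)

theorem ans_fold (bee : PySem.Dict (Int × Int) Int) :
    ∀ (ks : List (Int × Int)) (acc : List Int),
    (∀ p ∈ ks, ∃ v, bee.get? p = some v ∧ v ≠ 0) →
    (ks.foldl (fun (acc : List Int × PySem.Dict (Int × Int) Int) key =>
        let r := pvDget acc.2 key
        (if r.1 != 0 then acc.1 ++ [r.1] else acc.1, r.2)) (acc, bee)).1
      = acc ++ ks.map (fun p => bee.getD p 0) := by
  intro ks
  induction ks with
  | nil => intro acc _; simp
  | cons p ks ihk =>
    intro acc hk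
    obtain ⟨v, hv, hv0⟩ := hk p (by simp)
    have hd : pvDget bee p = (v, bee) := by unfold pvDget; rw [hv]
    rw [List.foldl_cons]
    dsimp only
    rw [hd]
    have h1 : (v != 0) = true := by simpa using hv0
    simp only [h1, if_true]
    rw [ihk (acc ++ [v]) (fun q hq => hk q (by simp [hq]))]
    simp [List.map_cons, PySem.Dict.getD_of_get?_eq_some bee 0 hv]
theorem loopA_result (n : Int) (hn : 2 ≤ n) :
    pvLoop n (3*n*n+2).toNat PySem.Dict.empty 1 0 0 0 = PySem.Dict.mk (pairsP n) := by
  have hpos : pvPos n (n-1) 0 0 = ((0:Int), (0:Int)) := by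
    unfold pvPos pvSS
    simp [pvDy, pvDx, pvDys, pvDxs, PySem.List.pyGetD, Prod.ext_iff]
    omega
  have hnum : pvNum n (n-1) 0 0 = 1 := by unfold pvNum; ring
  have hpref : prefP n (n-1) 0 0 ++ [pvPair n (n-1) 0 0] = [(((0:Int),(0:Int)), (1:Int))] := by
    unfold prefP ringsP pvPair
    rw [PySem.List.pyRange_neg_one_eq_nil (le_refl (n-1)), hpos, hnum]
    simp
  have hv : PvValid n (n-1) 0 0 := ⟨by omega, by omega, by omega, by omega, by omega, by omega⟩
  have hfuel : (3*(n-1)*((n-1)+1) + 1 - (0*(n-1) + 0)).toNat ≤ (3*n*n+2).toNat := by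
    apply Int.toNat_le_toNat
    nlinarith
  have hins : PySem.Dict.empty.insert (pvPos n (n-1) 0 0) (pvNum n (n-1) 0 0)
      = PySem.Dict.mk (prefP n (n-1) 0 0 ++ [pvPair n (n-1) 0 0]) := by
    rw [hpos, hnum, hpref]
    rfl
  have H := loopA_main n hn (3*n*n+2).toNat (n-1) 0 0 _ hv hfuel hins
  rw [hpos, hnum, show pvArr 0 0 = 0 from by unfold pvArr; simp] at H
  simpa using H

theorem ctr_insert (n : Int) (hn : 2 ≤ n) :
    (PySem.Dict.mk (ringsP n 0)).insert (2*(n-1), 0) (3*n*(n-1)+1)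
      = PySem.Dict.mk (pairsP n) := by
  have hfr : ((2*(n-1):Int), (0:Int)) ∉ (ringsP n 0).map (fun r => r.1) := by
    intro hmem
    have h := pairs_keys_nodup n
    unfold pairsP at h
    rw [List.map_append] at h
    exact List.disjoint_of_nodup_append h hmem (by simp [ctrP])
  rw [mk_insert_fresh _ _ _ hfr]
  rfl

theorem sorted_vals (n : Int) (hn : 2 ≤ n) :
    ∀ p ∈ PySem.List.sorted2 (PySem.Dict.mk (pairsP n)).keys
        (fun k => k.1) (fun k => k.2) false,
      ∃ v, (PySem.Dict.mk (pairsP n)).get? p = some v ∧ v ≠ 0 := by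
  intro p hp
  rw [(PySem.List.sorted2_perm _ _ _ _).mem_iff, PySem.Dict.keys_mk, List.mem_map] at hp
  obtain ⟨q, hq, rfl⟩ := hp
  refine ⟨q.2, mk_get?_mem _ _ _ (pairs_keys_nodup n) (by simpa using hq), ?_⟩
  have := pairs_val_pos n hn hq
  omega

theorem loopA_small (n : Int) (hn : n ≤ 1) (f : Nat) :
    pvLoop n (f+1) PySem.Dict.empty 1 0 0 0
      = PySem.Dict.mk [(((0:Int),(0:Int)), (1:Int))] := by
  have hbad : ∀ t : Int, 0 ≤ t → t ≤ 5 →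
      PvBad n (PySem.Dict.mk [(((0:Int),(0:Int)), (1:Int))]) ((0:Int) + pvDy t, (0:Int) + pvDx t) :=
    fun t h0 h5 => Or.inl (inRange_small n t hn h0 h5)
  simp only [pvLoop]
  rw [show (PySem.Dict.empty.insert ((0:Int), (0:Int)) (1:Int))
      = PySem.Dict.mk [(((0:Int),(0:Int)), (1:Int))] from rfl]
  rw [probe_bad_bad n 5 0 1 0 0 _ _ _ (hbad 0 (by omega) (by omega)) (by decide)
        (hbad 1 (by omega) (by omega)),
      probe_bad_bad n 4 1 2 0 0 _ _ _ (hbad 1 (by omega) (by omega)) (by decide)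
        (hbad 2 (by omega) (by omega)),
      probe_bad_bad n 3 2 3 0 0 _ _ _ (hbad 2 (by omega) (by omega)) (by decide)
        (hbad 3 (by omega) (by omega)),
      probe_bad_bad n 2 3 4 0 0 _ _ _ (hbad 3 (by omega) (by omega)) (by decide)
        (hbad 4 (by omega) (by omega)),
      probe_bad_bad n 1 4 5 0 0 _ _ _ (hbad 4 (by omega) (by omega)) (by decide)
        (hbad 5 (by omega) (by omega)),
      probe_bad_bad n 0 5 0 0 0 _ _ _ (hbad 5 (by omega) (by omega)) (by decide)
        (hbad 0 (by omega) (by omega))]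
  simp [pvProbe]

theorem alt_small (n : Int) (hn : n ≤ 1) : solution_alt n = [1] := by
  unfold solution_alt
  simp only
  rw [PySem.List.pyRange_neg_one_eq_nil (by omega : n - 1 ≤ 0)]
  simp only [List.foldl_nil]
  rw [show (PySem.Dict.empty.insert ((2*(n-1):Int), (0:Int)) (1:Int))
      = PySem.Dict.mk [(((2*(n-1):Int), (0:Int)), (1:Int))] from rfl]
  rw [PySem.Dict.keys_mk]
  simp only [List.map]
  rw [show PySem.List.sorted2 [((2*(n-1):Int), (0:Int))] (fun k => k.1) (fun k => k.2) false
      = [((2*(n-1):Int), (0:Int))] from rfl]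
  simp [PySem.Dict.getD_eq_get?_getD, PySem.Dict.get?_mk_cons]

theorem a_small (n : Int) (hn : n ≤ 1) : solution n = [1] := by
  unfold solution
  simp only
  obtain ⟨f, hf⟩ : ∃ f, (3*n*n+2).toNat = f + 1 := by
    refine ⟨(3*n*n+2).toNat - 1, ?_⟩
    have h2 : (0:Int) ≤ 3*n*n := by nlinarith [mul_self_nonneg n]
    generalize 3*n*n = m at h2 ⊢
    omega
  rw [hf, loopA_small n hn f]
  decide

theorem main_eq (n : Int) : solution n = solution_alt n := by
  by_cases hn : 2 ≤ n
  · unfold solution solution_alt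
    simp only
    rw [loopA_result n hn]
    have hB := B_rings n hn (n-1).toNat (n-1) rfl (by omega) (by omega)
    rw [show ringsP n (n-1) = [] from by
          unfold ringsP
          rw [PySem.List.pyRange_neg_one_eq_nil (le_refl (n-1))]
          simp,
        show pvNum n (n-1) 0 0 = 1 from by unfold pvNum; ring] at hB
    rw [show (PySem.Dict.empty : PySem.Dict (Int × Int) Int) = PySem.Dict.mk [] from rfl, hB]
    simp only
    rw [ctr_insert n hn]
    rw [ans_fold (PySem.Dict.mk (pairsP n)) _ [] (sorted_vals n hn)]
    simp
  · rw [a_small n (by omega), alt_small n (by omega)]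

-- ===== VERDICT (by name: the statement is the Claim_ definition above) =====
theorem solution_spec : Claim_equal_solution := by
  intro n _
  unfold Spec_solution
  exact main_eq n
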